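-- pv_equiv track=rewrite | github.com/dhermes/project-euler | python_code/conway_topograph.py | seek_up_to_val
-- ===== SOURCE A (Python) =====
-- def plus(cell1, cell2, back_val):
--     """
--     Moves forward between two cells. Requires a third cell, though
--     truly only requires the value of that the form takes at
--     the cell.
--     """
--     (x1, y1), val1 = cell1
--     (x2, y2), val2 = cell2
--     # back_val, val1 + val2, val form an arithmetic progression
--     val = 2*(val1 + val2) - back_val
--     x = x1 + x2
--     y = y1 + y2
--     return ( (x, y), val)
--
-- def seek_up_to_val(juncture, max_value):
--     """
--     Returns all cells sprouting forth from a positive root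
--     up to a cell value of max_value
--
--     Takes advantage of fact that all values must increase away
--     from the river (on positive side)
--     """
--     B, P, N, F = juncture
--     if F[1] > max_value:
--         return []
--     result = [F]
--
--     turn_left = plus(P, F, N[1])
--     J_left = (N, F, P, turn_left)
--     result.extend(seek_up_to_val(J_left, max_value))
--
--     turn_right = plus(N, F, P[1])
--     J_right = (P, F, N, turn_right)
--     result.extend(seek_up_to_val(J_right, max_value))
--     return result
-- ===== SOURCE B (Python) =====
-- def plus(cell1, cell2, back_val):
--     (x1, y1), val1 = cell1
--     (x2, y2), val2 = cell2
--     val = 2*(val1 + val2) - back_val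
--     x = x1 + x2
--     y = y1 + y2
--     return ((x, y), val)
--
--
-- def _grow(P, N, F, max_value):
--     """Build the pruned cell tree rooted at live cell F (prune BEFORE descending)."""
--     FL = plus(P, F, N[1])
--     FR = plus(N, F, P[1])
--     left = _grow(F, P, FL, max_value) if FL[1] <= max_value else None
--     right = _grow(F, N, FR, max_value) if FR[1] <= max_value else None
--     return (F, left, right)
--
--
-- def _flatten(t, acc):
--     """Preorder flatten with an accumulator."""
--     F, left, right = t
--     acc = _flatten(right, acc) if right is not None else acc
--     acc = _flatten(left, acc) if left is not None else acc
--     return [F] + acc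
--
--
-- def seek_up_to_val(juncture, max_value):
--     """Two-stage version: first build the pruned tree of cells, then preorder-flatten it."""
--     _B, P, N, F = juncture
--     if F[1] > max_value:
--         return []
--     return _flatten(_grow(P, N, F, max_value), [])
-- ===== Notes on version B (the rewrite author's own statement) =====
-- stated objective: alternative
-- what changed: B splits A's single recursive list-building function into a two-stage pipeline: first build an explicit pruned binary tree of cells (pruning children before descending instead of on entry), then preorder-flatten that tree with an accumulator.
import Mathlib
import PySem

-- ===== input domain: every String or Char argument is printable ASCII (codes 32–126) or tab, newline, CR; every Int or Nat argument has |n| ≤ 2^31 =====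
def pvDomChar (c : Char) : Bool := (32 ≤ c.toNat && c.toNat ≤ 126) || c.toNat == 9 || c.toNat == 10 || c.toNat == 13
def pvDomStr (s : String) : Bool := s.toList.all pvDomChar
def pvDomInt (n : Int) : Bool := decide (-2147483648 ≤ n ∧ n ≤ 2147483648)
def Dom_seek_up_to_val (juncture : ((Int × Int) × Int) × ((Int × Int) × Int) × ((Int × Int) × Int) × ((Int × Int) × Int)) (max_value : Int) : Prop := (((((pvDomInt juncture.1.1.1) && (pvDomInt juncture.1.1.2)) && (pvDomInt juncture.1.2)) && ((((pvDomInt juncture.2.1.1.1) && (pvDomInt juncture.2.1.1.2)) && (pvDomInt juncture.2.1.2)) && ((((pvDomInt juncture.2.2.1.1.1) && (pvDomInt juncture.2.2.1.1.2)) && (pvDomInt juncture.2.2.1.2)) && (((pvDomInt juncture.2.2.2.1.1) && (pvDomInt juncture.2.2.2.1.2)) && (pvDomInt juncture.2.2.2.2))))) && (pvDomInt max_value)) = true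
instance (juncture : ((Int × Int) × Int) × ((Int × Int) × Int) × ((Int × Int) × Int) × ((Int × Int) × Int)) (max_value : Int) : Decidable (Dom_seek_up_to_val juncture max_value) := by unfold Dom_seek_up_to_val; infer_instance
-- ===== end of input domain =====

-- B replaces A's single recursive list-building function by a two-stage pipeline
-- (build an explicit pruned tree, then preorder-flatten it with an accumulator);
-- alternative decomposition, same cost; return values proved equal on Pre_.

-- ===== PORT A =====
-- helper `plus` of the Python module, transliterated
def pvPlus (cell1 cell2 : (Int × Int) × Int) (back_val : Int) : (Int × Int) × Int :=
  ((cell1.1.1 + cell2.1.1, cell1.1.2 + cell2.1.2), 2 * (cell1.2 + cell2.2) - back_val)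

-- A's recursion, with a fuel argument only as a totality guard (the Python has no fuel);
-- under Pre_ the fuel chosen by `seek_up_to_val` is never exhausted.
def pvSeekA (mv : Int) :
    Nat → (((Int × Int) × Int) × ((Int × Int) × Int) × ((Int × Int) × Int) × ((Int × Int) × Int)) →
    List ((Int × Int) × Int)
  | f, (_B, P, N, F) =>
    if F.2 > mv then []
    else
      match f with
      | 0 => []  -- fuel guard, unreachable under Pre_
      | f + 1 =>
        F :: (pvSeekA mv f (N, F, P, pvPlus P F N.2) ++ pvSeekA mv f (P, F, N, pvPlus N F P.2))

def seek_up_to_val (juncture : ((Int × Int) × Int) × ((Int × Int) × Int) × ((Int × Int) × Int) × ((Int × Int) × Int)) (max_value : Int) : List ((Int × Int) × Int) :=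
  pvSeekA max_value (max_value + 1 - juncture.2.2.2.2).toNat juncture

-- ===== PORT B =====
-- Source B's tree of cells: a node carries a live cell and its two (possibly absent) subtrees.
inductive PvTree where
  | nil : PvTree
  | node : ((Int × Int) × Int) → PvTree → PvTree → PvTree
deriving DecidableEq, Repr

-- Source B's `_grow(P, N, F, max_value)`: F is known live; children are pruned BEFORE the
-- recursive descent. The fuel argument is a totality guard only (the Python has none);
-- under Pre_ the fuel chosen by `seek_up_to_val_alt` is never exhausted.
def pvGrow (mv : Int) : Nat → ((Int × Int) × Int) → ((Int × Int) × Int) → ((Int × Int) × Int) → PvTree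
  | 0, _, _, _ => PvTree.nil  -- fuel guard, unreachable under Pre_
  | f + 1, P, N, F =>
    let FL := pvPlus P F N.2
    let FR := pvPlus N F P.2
    PvTree.node F
      (if FL.2 ≤ mv then pvGrow mv f F P FL else PvTree.nil)
      (if FR.2 ≤ mv then pvGrow mv f F N FR else PvTree.nil)

-- Source B's `_flatten(t, acc)`: preorder flatten with an accumulator (nil = Python None).
def pvFlatten : PvTree → List ((Int × Int) × Int) → List ((Int × Int) × Int)
  | PvTree.nil, acc => acc
  | PvTree.node F l r, acc => F :: pvFlatten l (pvFlatten r acc)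

def seek_up_to_val_alt (juncture : ((Int × Int) × Int) × ((Int × Int) × Int) × ((Int × Int) × Int) × ((Int × Int) × Int)) (max_value : Int) : List ((Int × Int) × Int) :=
  if juncture.2.2.2.2 > max_value then []
  else pvFlatten (pvGrow max_value (max_value + 1 - juncture.2.2.2.2).toNat juncture.2.1 juncture.2.2.1 juncture.2.2.2) []

-- ===== PRECONDITION & SPEC =====
-- Pre_ admits every input whose root cell value already exceeds max_value (immediate
-- return of []) and every juncture satisfying the positive-topograph invariant (the P
-- and N values are ≥ 1 and ≤ the F value) that this Project-Euler code's caller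
-- establishes; outside it A's recursion can be unbounded (RecursionError), though on
-- some excluded inputs A still returns, and B returns the same list there — the
-- exclusion only justifies the Lean ports' totality fuel.
def Pre_seek_up_to_val (juncture : ((Int × Int) × Int) × ((Int × Int) × Int) × ((Int × Int) × Int) × ((Int × Int) × Int)) (max_value : Int) : Prop :=
  juncture.2.2.2.2 > max_value ∨
    (1 ≤ juncture.2.1.2 ∧ 1 ≤ juncture.2.2.1.2 ∧
     juncture.2.1.2 ≤ juncture.2.2.2.2 ∧ juncture.2.2.1.2 ≤ juncture.2.2.2.2)
instance (juncture : ((Int × Int) × Int) × ((Int × Int) × Int) × ((Int × Int) × Int) × ((Int × Int) × Int)) (max_value : Int) : Decidable (Pre_seek_up_to_val juncture max_value) := by unfold Pre_seek_up_to_val; infer_instance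

def pvWitness_seek_up_to_val : (((Int × Int) × Int) × ((Int × Int) × Int) × ((Int × Int) × Int) × ((Int × Int) × Int)) × Int :=
  ((((0, 0), 1), ((1, 0), 1), ((0, 1), 1), ((1, 1), 3)), 10)

def Spec_seek_up_to_val (juncture : ((Int × Int) × Int) × ((Int × Int) × Int) × ((Int × Int) × Int) × ((Int × Int) × Int)) (max_value : Int) (out : List ((Int × Int) × Int)) : Prop := out = seek_up_to_val_alt juncture max_value
instance (juncture : ((Int × Int) × Int) × ((Int × Int) × Int) × ((Int × Int) × Int) × ((Int × Int) × Int)) (max_value : Int) (out : List ((Int × Int) × Int)) : Decidable (Spec_seek_up_to_val juncture max_value out) := by unfold Spec_seek_up_to_val; infer_instance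

-- ===== CLAIM (what is proved, stated in full; the proofs are below) =====
def Claim_equal_seek_up_to_val : Prop := ∀ (juncture : ((Int × Int) × Int) × ((Int × Int) × Int) × ((Int × Int) × Int) × ((Int × Int) × Int)) (max_value : Int), Dom_seek_up_to_val juncture max_value → Pre_seek_up_to_val juncture max_value → Spec_seek_up_to_val juncture max_value (seek_up_to_val juncture max_value)

-- ===== LEMMAS AND PROOFS =====

-- accumulator-free preorder of a tree
def pvPre : PvTree → List ((Int × Int) × Int)
  | PvTree.nil => []
  | PvTree.node F l r => F :: (pvPre l ++ pvPre r)

lemma pvFlatten_eq_pre (t : PvTree) (acc : List ((Int × Int) × Int)) :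
    pvFlatten t acc = pvPre t ++ acc := by
  induction t generalizing acc with
  | nil => simp [pvFlatten, pvPre]
  | node F l r ihl ihr => simp [pvFlatten, pvPre, ihl, ihr]

-- A's recursion at any fuel equals the preorder of Source B's pruned tree at the same fuel:
-- at fuel 0 both are empty, and A's on-entry prune matches B's before-descent prune.
lemma pvSeekA_eq_pre_grow (mv : Int) :
    ∀ (f : Nat) (B P N F : (Int × Int) × Int),
      pvSeekA mv f (B, P, N, F) =
        if F.2 > mv then [] else pvPre (pvGrow mv f P N F) := by
  intro f
  induction f with
  | zero =>
    intro B P N F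
    rw [pvSeekA]
    by_cases h : F.2 > mv <;> simp [h, pvGrow, pvPre]
  | succ f ih =>
    intro B P N F
    rw [pvSeekA]
    by_cases h : F.2 > mv
    · simp [h]
    · simp only [h, if_false]
      rw [ih, ih]
      simp only [pvGrow, pvPre]
      split_ifs <;> first | omega | simp [pvPre]

-- ===== VERDICT (by name: the statement is the Claim_ definition above) =====
theorem seek_up_to_val_spec : Claim_equal_seek_up_to_val := by
  intro j mv _hdom hpre
  obtain ⟨B, P, N, F⟩ := j
  unfold Spec_seek_up_to_val seek_up_to_val seek_up_to_val_alt
  simp only [pvSeekA_eq_pre_grow]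
  rcases hpre with hgt | _hinv
  · -- root already exceeds max_value: both sides are []
    simp only at hgt
    simp [hgt]
  · by_cases h : F.2 > mv
    · simp [h]
    · simp [h, pvFlatten_eq_pre]
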